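-- pv_equiv track=rewrite | github.com/sirote/advent-of-code | 2023/Day 13: Point of Incidence/point_of_incidence.py | summarize_score
-- ===== SOURCE A (Python) =====
-- from itertools import pairwise
--
-- def find_indices(grid, allow_errors=0):
--     """Find indices of rows that differ by at most `allow_errors`
--     patterns.
--     """
--     for i, (row1, row2) in enumerate(pairwise(grid)):
--         if sum(a != b for a, b in zip(row1, row2)) <= allow_errors:
--             yield i
--
-- def vertical_reflection(grid, smudges=0):
--     """Iterate over indices of first column of vertical reflection
--     lines.
--     """
--     _grid = list(zip(*grid))
--     yield from horizontal_reflection(_grid, smudges=smudges)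
--
-- def horizontal_reflection(grid, smudges=0):
--     """Iterate over indices of first row of horizontal reflection
--     lines.
--     """
--     for i in find_indices(grid, allow_errors=smudges):
--         _smudges = smudges
--         for j, k in zip(range(i + 1, len(grid)), range(i, -1, -1)):
--             diff = sum(a != b for a, b in zip(grid[j], grid[k]))
--             if diff <= _smudges:
--                 _smudges -= diff
--             else:
--                 break
--         else:
--             yield i
--
-- def summarize_score(grids, smudges=0):
--     """Return the number after summerizing the pattern notes."""
--     number = 0
--     for grid in grids:
--         index = _find_index(vertical_reflection, grid, smudges=smudges)
--         if index is not None: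
--             number += index + 1
--             continue
--
--         index = _find_index(horizontal_reflection, grid, smudges=smudges)
--         if index is not None:
--             number += 100 * (index + 1)
--
--     return number
--
-- def _find_index(reflection, grid, smudges=0):
--     index = next(reflection(grid), None)
--     if smudges:
--         index = _find_smudge_index(reflection(grid, smudges=smudges), index)
--
--     return index
--
-- def _find_smudge_index(reflections, index):
--     for smudge_index in reflections:
--         if smudge_index != index:
--             index = smudge_index
--             break
--     else:
--         index = None
--
--     return index
-- ===== SOURCE B (Python) =====
-- def _mismatch(lines, i, cap):
--     """Mismatch count over all mirrored line pairs around the split below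
--     line i, counted exactly up to `cap` (any value > cap just reports 'too
--     many', which is all the selection ever needs)."""
--     total = 0
--     for j, k in zip(range(i + 1, len(lines)), range(i, -1, -1)):
--         if lines[j] != lines[k]:
--             total += sum(a != b for a, b in zip(lines[j], lines[k]))
--             if total > cap:
--                 break
--     return total
--
-- def _choose(lines, smudges):
--     """First index whose split has mismatch count 0 (smudges == 0), or
--     mismatch count <= smudges at an index other than the 0-smudge line."""
--     cap = smudges if smudges > 0 else 0
--     perfect_seen = False
--     for i in range(len(lines) - 1):
--         c = _mismatch(lines, i, cap)
--         if smudges == 0: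
--             if c == 0:
--                 return i
--         elif c <= smudges:
--             if c == 0 and not perfect_seen:
--                 perfect_seen = True
--             else:
--                 return i
--     return None
--
-- def summarize_score(grids, smudges=0):
--     """Return the number after summerizing the pattern notes."""
--     total = 0
--     for grid in grids:
--         c = _choose(list(zip(*grid)), smudges)
--         if c is not None:
--             total += c + 1
--         else:
--             r = _choose(list(grid), smudges)
--             if r is not None:
--                 total += 100 * (r + 1)
--     return total
-- ===== Notes on version B (the rewrite author's own statement) =====
-- stated objective: faster
-- what changed: A pipes generators through a pairwise prefilter and a budget-tracking inner loop plus two helper selectors scanning the candidate list twice; B makes one pass over the candidate splits, computing for each a mismatch total counted only up to the smudge budget (early break) and returning at the first acceptable split while tracking whether the perfect line was already seen.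
import Mathlib
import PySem

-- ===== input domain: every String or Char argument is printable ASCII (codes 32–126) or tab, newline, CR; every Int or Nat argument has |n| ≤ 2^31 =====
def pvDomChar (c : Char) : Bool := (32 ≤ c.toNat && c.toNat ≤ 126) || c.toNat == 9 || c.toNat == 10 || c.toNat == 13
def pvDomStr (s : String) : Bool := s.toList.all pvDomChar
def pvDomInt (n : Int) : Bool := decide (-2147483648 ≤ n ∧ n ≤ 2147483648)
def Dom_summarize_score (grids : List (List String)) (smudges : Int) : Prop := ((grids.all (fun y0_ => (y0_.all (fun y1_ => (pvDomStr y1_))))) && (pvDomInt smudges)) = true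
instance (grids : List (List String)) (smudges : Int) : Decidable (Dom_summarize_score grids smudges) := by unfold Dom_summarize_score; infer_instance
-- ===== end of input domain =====

-- B replaces A's generator pipeline (pairwise prefilter + budget-tracking inner loop with
-- break/else + two selector helpers that scan the candidates twice) by one pass over the
-- candidate splits: per split a mismatch total counted only up to the smudge budget, returning
-- at the first acceptable split; same results, measured faster in a timing run.

-- ===== PORT A =====
-- shared by both ports: sum(a != b for a, b in zip(row1, row2))
def pvDiff (a b : List Char) : Int :=
  ((a.zip b).map (fun p => if p.1 ≠ p.2 then (1 : Int) else 0)).sum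

-- shared by both ports: list(zip(*grid))
def pvTranspose (rows : List (List Char)) : List (List Char) :=
  match rows with
  | [] => []
  | r :: rs =>
    (List.range (rs.foldl (fun m x => min m x.length) r.length)).map
      (fun i => (r :: rs).map (fun row => row.getD i ' '))

-- shared by both ports: zip(range(i + 1, n), range(i, -1, -1))
def pvPairs (i n : Int) : List (Int × Int) :=
  (PySem.List.pyRange (i + 1) n 1).zip (PySem.List.pyRange i (-1) (-1))

-- find_indices(grid, allow_errors): collected generator
def pvFindIndices (g : List (List Char)) (allow : Int) : List Int :=
  (PySem.List.enumerate (g.zip g.tail)).foldl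
    (fun acc p => if pvDiff p.2.1 p.2.2 ≤ allow then acc ++ [p.1] else acc) []

-- the inner for/else loop of horizontal_reflection, with its running budget `_smudges`
def pvInner (g : List (List Char)) : List (Int × Int) → Int → Bool
  | [], _ => true
  | p :: rest, budget =>
    let d := pvDiff (PySem.List.pyGetD g p.1 []) (PySem.List.pyGetD g p.2 [])
    if d ≤ budget then pvInner g rest (budget - d) else false

-- horizontal_reflection(grid, smudges): collected generator
def pvHoriz (g : List (List Char)) (smudges : Int) : List Int :=
  (pvFindIndices g smudges).filter
    (fun i => pvInner g (pvPairs i (PySem.List.len g)) smudges)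

-- vertical_reflection(grid, smudges): collected generator
def pvVert (g : List (List Char)) (smudges : Int) : List Int :=
  pvHoriz (pvTranspose g) smudges

-- _find_smudge_index(reflections, index)
def pvFindSmudgeIndex : List Int → Option Int → Option Int
  | [], _ => none
  | r :: rest, idx => if some r ≠ idx then some r else pvFindSmudgeIndex rest idx

-- _find_index(reflection, grid, smudges)
def pvFindIndex (refl : List (List Char) → Int → List Int) (g : List (List Char))
    (smudges : Int) : Option Int :=
  let idx := (refl g 0).head?
  if smudges ≠ 0 then pvFindSmudgeIndex (refl g smudges) idx else idx

def summarize_score (grids : List (List String)) (smudges : Int) : Int :=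
  grids.foldl (fun number grid =>
    let g := grid.map String.toList
    match pvFindIndex pvVert g smudges with
    | some i => number + (i + 1)
    | none =>
      match pvFindIndex pvHoriz g smudges with
      | some i => number + 100 * (i + 1)
      | none => number) 0

-- ===== PORT B =====
-- the counting loop of _mismatch(lines, i, cap), with its early break once total > cap
def pvMismatchCap (lines : List (List Char)) (cap : Int) : List (Int × Int) → Int → Int
  | [], total => total
  | p :: rest, total =>
    if PySem.List.pyGetD lines p.1 [] ≠ PySem.List.pyGetD lines p.2 [] then
      if cap < total + pvDiff (PySem.List.pyGetD lines p.1 []) (PySem.List.pyGetD lines p.2 []) then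
        total + pvDiff (PySem.List.pyGetD lines p.1 []) (PySem.List.pyGetD lines p.2 [])
      else
        pvMismatchCap lines cap rest
          (total + pvDiff (PySem.List.pyGetD lines p.1 []) (PySem.List.pyGetD lines p.2 []))
    else pvMismatchCap lines cap rest total

-- _mismatch(lines, i, cap): mirrored-pair mismatch count, exact up to cap
def pvMismatch (lines : List (List Char)) (i : Int) (cap : Int) : Int :=
  pvMismatchCap lines cap (pvPairs i (PySem.List.len lines)) 0

-- the selection loop of _choose(lines, smudges), with its perfect_seen flag
def pvChooseLoop (lines : List (List Char)) (smudges cap : Int) :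
    List Int → Bool → Option Int
  | [], _ => none
  | i :: rest, seen =>
    if smudges = 0 then
      if pvMismatch lines i cap = 0 then some i else pvChooseLoop lines smudges cap rest seen
    else if pvMismatch lines i cap ≤ smudges then
      if pvMismatch lines i cap = 0 ∧ seen = false then pvChooseLoop lines smudges cap rest true
      else some i
    else pvChooseLoop lines smudges cap rest seen

-- _choose(lines, smudges)
def pvChoose (lines : List (List Char)) (smudges : Int) : Option Int :=
  pvChooseLoop lines smudges (if 0 < smudges then smudges else 0)
    (PySem.List.pyRange 0 (PySem.List.len lines - 1) 1) false

def summarize_score_alt (grids : List (List String)) (smudges : Int) : Int :=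
  grids.foldl (fun total grid =>
    let g := grid.map String.toList
    match pvChoose (pvTranspose g) smudges with
    | some c => total + (c + 1)
    | none =>
      match pvChoose g smudges with
      | some r => total + 100 * (r + 1)
      | none => total) 0

-- ===== PRECONDITION & SPEC =====
def Spec_summarize_score (grids : List (List String)) (smudges : Int) (out : Int) : Prop := out = summarize_score_alt grids smudges
instance (grids : List (List String)) (smudges : Int) (out : Int) : Decidable (Spec_summarize_score grids smudges out) := by unfold Spec_summarize_score; infer_instance

-- ===== CLAIM (what is proved, stated in full; the proofs are below) =====
def Claim_equal_summarize_score : Prop := ∀ (grids : List (List String)) (smudges : Int), Dom_summarize_score grids smudges → Spec_summarize_score grids smudges (summarize_score grids smudges)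

-- ===== LEMMAS AND PROOFS =====

-- proof-side: the exact total mismatch count around split i (what pvMismatch computes up to cap)
def pvExact (lines : List (List Char)) (i : Int) : Int :=
  ((pvPairs i (PySem.List.len lines)).map
    (fun p => pvDiff (PySem.List.pyGetD lines p.1 []) (PySem.List.pyGetD lines p.2 []))).sum

theorem pvDiff_nonneg (a b : List Char) : 0 ≤ pvDiff a b := by
  unfold pvDiff
  induction (a.zip b) with
  | nil => simp
  | cons x t ih => simp only [List.map_cons, List.sum_cons]; split <;> omega

theorem pvDiff_comm (a b : List Char) : pvDiff a b = pvDiff b a := by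
  unfold pvDiff
  induction a generalizing b with
  | nil => cases b <;> simp
  | cons x t ih =>
    cases b with
    | nil => simp
    | cons y u =>
      simp only [List.zip_cons_cons, List.map_cons, List.sum_cons, ih u]
      congr 1
      by_cases h : x = y <;> simp [h, Ne.symm]
theorem pvSumDiff_nonneg (g : List (List Char)) (l : List (Int × Int)) :
    0 ≤ ((l.map (fun p => pvDiff (PySem.List.pyGetD g p.1 []) (PySem.List.pyGetD g p.2 []))).sum) := by
  induction l with
  | nil => simp
  | cons x t ih =>
    simp only [List.map_cons, List.sum_cons]
    have := pvDiff_nonneg (PySem.List.pyGetD g x.1 []) (PySem.List.pyGetD g x.2 [])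
    omega

theorem pvExact_nonneg (lines : List (List Char)) (i : Int) : 0 ≤ pvExact lines i := by
  unfold pvExact; exact pvSumDiff_nonneg lines (pvPairs i (PySem.List.len lines))

-- facts specific to this file's two programs (generic find? lemmas below are not in Mathlib)
theorem pvFind?_filter {α : Type} (p q : α → Bool) (l : List α) :
    (l.filter q).find? p = l.find? (fun x => q x && p x) := by
  induction l with
  | nil => rfl
  | cons x t ih =>
    by_cases hq : q x
    · by_cases hp : p x <;> simp [hq, hp, ih]
    · simp [hq, ih]

theorem pvFind?_congr_mem {α : Type} {p q : α → Bool} :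
    ∀ l : List α, (∀ x ∈ l, p x = q x) → l.find? p = l.find? q := by
  intro l
  induction l with
  | nil => intro _; rfl
  | cons x t ih =>
    intro h
    have hx := h x (by simp)
    by_cases hp : p x
    · simp [hp, hx ▸ hp]
    · have hq : ¬ q x = true := by rw [← hx]; exact hp
      simp only [List.find?_cons, Bool.eq_false_iff.2 hp, Bool.eq_false_iff.2 hq]
      exact ih (fun y hy => h y (by simp [hy]))

theorem pvFindSmudgeIndex_eq_find? (l : List Int) (idx : Option Int) :
    pvFindSmudgeIndex l idx = l.find? (fun r => decide (some r ≠ idx)) := by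
  induction l with
  | nil => rfl
  | cons r t ih =>
    by_cases h : some r ≠ idx <;> simp [pvFindSmudgeIndex, h, ih]

theorem pvRange_toNat (a : Int) :
    PySem.List.pyRange 0 ((a.toNat : Nat) : Int) 1 = PySem.List.pyRange 0 a 1 := by
  by_cases h : a ≤ 0
  · rw [PySem.List.pyRange_one_eq_nil (by omega), PySem.List.pyRange_one_eq_nil h]
  · congr 1; omega

theorem pvInner_eq (g : List (List Char)) :
    ∀ (pairs : List (Int × Int)) (b : Int), pairs ≠ [] →
      pvInner g pairs b =
        decide (((pairs.map (fun p => pvDiff (PySem.List.pyGetD g p.1 []) (PySem.List.pyGetD g p.2 []))).sum) ≤ b) := by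
  intro pairs
  induction pairs with
  | nil => intro b h; exact absurd rfl h
  | cons p rest ih =>
    intro b _
    simp only [pvInner, List.map_cons, List.sum_cons]
    cases rest with
    | nil =>
      simp only [pvInner, List.map_nil, List.sum_nil]
      split <;> rename_i h <;> [skip; skip] <;> simp <;> omega
    | cons q t =>
      rw [ih (b - pvDiff (PySem.List.pyGetD g p.1 []) (PySem.List.pyGetD g p.2 [])) (by simp)]
      have hS := pvSumDiff_nonneg g (q :: t)
      split <;> rename_i h
      · congr 1
        simp only [eq_iff_iff]
        omega
      · simp only [List.map_cons, List.sum_cons] at hS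
        simp
        omega

theorem pvGetD_zip_tail (g : List (List Char)) (j : Int) (h0 : 0 ≤ j)
    (h1 : j < (g.length : Int) - 1) :
    PySem.List.pyGetD (g.zip g.tail) j ([], []) =
      (PySem.List.pyGetD g j [], PySem.List.pyGetD g (j + 1) []) := by
  have hz : (g.zip g.tail).length = g.length - 1 := by
    simp [List.length_zip]
  rw [PySem.List.pyGetD_eq_getElem (g.zip g.tail) ([], []) h0 (by omega),
      PySem.List.pyGetD_eq_getElem g [] h0 (by omega),
      PySem.List.pyGetD_eq_getElem g [] (show (0:Int) ≤ j + 1 by omega) (by omega)]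
  rw [List.getElem_zip]
  have hidx : (j + 1).toNat = j.toNat + 1 := by omega
  refine Prod.ext rfl ?_
  simp only [List.getElem_tail, hidx]

theorem pvFindIndices_eq (g : List (List Char)) (allow : Int) :
    pvFindIndices g allow =
      (PySem.List.pyRange 0 ((g.length : Int) - 1) 1).filter
        (fun i => decide (pvDiff (PySem.List.pyGetD g i []) (PySem.List.pyGetD g (i + 1) []) ≤ allow)) := by
  unfold pvFindIndices
  rw [PySem.List.foldl_append_ite (fun q : Int × (List Char × List Char) => pvDiff q.2.1 q.2.2 ≤ allow)
      (fun q : Int × (List Char × List Char) => q.1),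
      PySem.List.enumerate_eq_map_pyRange _ ([], []), List.filter_map, List.map_map]
  have hrange : PySem.List.pyRange 0 (PySem.List.len (g.zip g.tail)) 1 =
      PySem.List.pyRange 0 ((g.length : Int) - 1) 1 := by
    rw [PySem.List.len_eq]
    have h : (g.zip g.tail).length = ((g.length : Int) - 1).toNat := by
      simp [List.length_zip]
    rw [h, pvRange_toNat]
  rw [hrange]
  have h1 : ((fun q : Int × (List Char × List Char) => q.1) ∘
      fun j : Int => (j, PySem.List.pyGetD (g.zip g.tail) j ([], []))) = fun j => j := rfl
  rw [List.nil_append, h1, List.map_id']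
  refine List.filter_congr ?_
  intro j hj
  rw [PySem.List.mem_pyRange_one] at hj
  simp only [Function.comp_apply, pvGetD_zip_tail g j hj.1 hj.2]

theorem pvHoriz_eq (g : List (List Char)) (s : Int) :
    pvHoriz g s =
      (PySem.List.pyRange 0 ((g.length : Int) - 1) 1).filter
        (fun i => decide (pvExact g i ≤ s)) := by
  unfold pvHoriz
  rw [pvFindIndices_eq, List.filter_filter]
  refine List.filter_congr ?_
  intro i hi
  rw [PySem.List.mem_pyRange_one] at hi
  have hcons : pvPairs i (PySem.List.len g) =
      (i + 1, i) :: ((PySem.List.pyRange (i + 1 + 1) (g.length : Int) 1).zip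
        (PySem.List.pyRange (i - 1) (-1) (-1))) := by
    unfold pvPairs
    rw [PySem.List.len_eq, PySem.List.pyRange_one_cons (by omega),
        PySem.List.pyRange_neg_one_cons (by omega), List.zip_cons_cons]
  have hrest := pvSumDiff_nonneg g ((PySem.List.pyRange (i + 1 + 1) (g.length : Int) 1).zip
    (PySem.List.pyRange (i - 1) (-1) (-1)))
  have hm : pvExact g i =
      pvDiff (PySem.List.pyGetD g (i + 1) []) (PySem.List.pyGetD g i []) +
      (((PySem.List.pyRange (i + 1 + 1) (g.length : Int) 1).zip
        (PySem.List.pyRange (i - 1) (-1) (-1))).map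
          (fun p => pvDiff (PySem.List.pyGetD g p.1 []) (PySem.List.pyGetD g p.2 []))).sum := by
    unfold pvExact
    rw [hcons]
    simp
  rw [pvInner_eq g _ s (by rw [hcons]; simp), hcons]
  simp only [List.map_cons, List.sum_cons]
  simp only [← hm]
  have hcomm : pvDiff (PySem.List.pyGetD g i []) (PySem.List.pyGetD g (i + 1) []) =
      pvDiff (PySem.List.pyGetD g (i + 1) []) (PySem.List.pyGetD g i []) := pvDiff_comm _ _
  by_cases hA : pvExact g i ≤ s
  · have hB : pvDiff (PySem.List.pyGetD g i []) (PySem.List.pyGetD g (i + 1) []) ≤ s := by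
      rw [hcomm]; omega
    simp [hA, hB]
  · simp [hA]

theorem pvDiff_self (a : List Char) : pvDiff a a = 0 := by
  unfold pvDiff
  induction a with
  | nil => simp
  | cons x t ih => simpa using ih

theorem pvMismatchCap_spec (lines : List (List Char)) (cap : Int) (_hc : 0 ≤ cap) :
    ∀ (pairs : List (Int × Int)) (total : Int),
      pvMismatchCap lines cap pairs total =
          total + ((pairs.map (fun p => pvDiff (PySem.List.pyGetD lines p.1 [])
            (PySem.List.pyGetD lines p.2 []))).sum) ∨
        (cap < pvMismatchCap lines cap pairs total ∧
          cap < total + ((pairs.map (fun p => pvDiff (PySem.List.pyGetD lines p.1 [])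
            (PySem.List.pyGetD lines p.2 []))).sum)) := by
  intro pairs
  induction pairs with
  | nil => intro total; left; simp [pvMismatchCap]
  | cons p rest ih =>
    intro total
    have hrest := pvSumDiff_nonneg lines rest
    simp only [pvMismatchCap, List.map_cons, List.sum_cons]
    split
    · split
      · rename_i hlt
        right
        constructor
        · exact hlt
        · omega
      · rename_i hle
        rcases ih (total + pvDiff (PySem.List.pyGetD lines p.1 [])
            (PySem.List.pyGetD lines p.2 [])) with h | h <;> omega
    · rename_i heq'
      have heq : PySem.List.pyGetD lines p.1 [] = PySem.List.pyGetD lines p.2 [] :=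
        not_ne_iff.mp heq'
      have h0 : pvDiff (PySem.List.pyGetD lines p.1 []) (PySem.List.pyGetD lines p.2 []) = 0 := by
        rw [heq, pvDiff_self]
      rcases ih total with h | h <;> omega

theorem pvCap_zero_iff (lines : List (List Char)) (cap i : Int) (hc : 0 ≤ cap) :
    pvMismatch lines i cap = 0 ↔ pvExact lines i = 0 := by
  have h := pvMismatchCap_spec lines cap hc (pvPairs i (PySem.List.len lines)) 0
  unfold pvMismatch pvExact
  omega

theorem pvCap_le_iff (lines : List (List Char)) (cap s i : Int) (hc : 0 ≤ cap)
    (hsc : s ≤ cap) : pvMismatch lines i cap ≤ s ↔ pvExact lines i ≤ s := by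
  have h := pvMismatchCap_spec lines cap hc (pvPairs i (PySem.List.len lines)) 0
  unfold pvMismatch pvExact
  omega

theorem pvChooseLoop_zero (lines : List (List Char)) (cap : Int) (hc : 0 ≤ cap) :
    ∀ (l : List Int) (seen : Bool),
      pvChooseLoop lines 0 cap l seen = l.find? (fun i => pvExact lines i == 0) := by
  intro l
  induction l with
  | nil => intro seen; rfl
  | cons i rest ih =>
    intro seen
    simp only [pvChooseLoop, List.find?_cons]
    by_cases hz : pvExact lines i = 0
    · rw [if_pos ((pvCap_zero_iff lines cap i hc).mpr hz)]
      simp [hz]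
    · rw [if_neg (fun h => hz ((pvCap_zero_iff lines cap i hc).mp h)), ih seen]
      have : (pvExact lines i == 0) = false := beq_eq_false_iff_ne.mpr hz
      simp [this]

theorem pvChooseLoop_seen (lines : List (List Char)) (s cap : Int) (hs : s ≠ 0)
    (hc : 0 ≤ cap) (hsc : s ≤ cap) :
    ∀ l : List Int,
      pvChooseLoop lines s cap l true = l.find? (fun i => decide (pvExact lines i ≤ s)) := by
  intro l
  induction l with
  | nil => rfl
  | cons i rest ih =>
    simp only [pvChooseLoop, if_neg hs, List.find?_cons]
    by_cases hle : pvExact lines i ≤ s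
    · rw [if_pos ((pvCap_le_iff lines cap s i hc hsc).mpr hle)]
      rw [if_neg (by simp)]
      simp [hle]
    · rw [if_neg (fun h => hle ((pvCap_le_iff lines cap s i hc hsc).mp h)), ih]
      simp [hle]

theorem pvChooseLoop_unseen (lines : List (List Char)) (s cap : Int) (hs : s ≠ 0)
    (hc : 0 ≤ cap) (hsc : s ≤ cap) :
    ∀ l : List Int, l.Nodup →
      pvChooseLoop lines s cap l false =
        l.find? (fun i => decide (pvExact lines i ≤ s) &&
          decide (some i ≠ l.find? (fun j => pvExact lines j == 0))) := by
  intro l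
  induction l with
  | nil => intro _; rfl
  | cons i rest ih =>
    intro hnd
    have hmem : i ∉ rest := (List.nodup_cons.mp hnd).1
    have hrest : rest.Nodup := (List.nodup_cons.mp hnd).2
    have hEnn := pvExact_nonneg lines
    simp only [pvChooseLoop, if_neg hs]
    by_cases hle : pvExact lines i ≤ s
    · rw [if_pos ((pvCap_le_iff lines cap s i hc hsc).mpr hle)]
      by_cases hz : pvExact lines i = 0
      · rw [if_pos (by simp [(pvCap_zero_iff lines cap i hc).mpr hz]),
            pvChooseLoop_seen lines s cap hs hc hsc]
        have hP : (i :: rest).find? (fun j => pvExact lines j == 0) = some i := by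
          simp [hz]
        rw [List.find?_cons, hP]
        have hpredi : (decide (pvExact lines i ≤ s) && decide (some i ≠ some i)) = false := by
          simp
        rw [hpredi]
        refine (pvFind?_congr_mem rest ?_).symm
        intro j hj
        have : j ≠ i := fun h => hmem (h ▸ hj)
        simp [this]
      · rw [if_neg (fun h => hz ((pvCap_zero_iff lines cap i hc).mp h.1))]
        have hP : (i :: rest).find? (fun j => pvExact lines j == 0) =
            rest.find? (fun j => pvExact lines j == 0) := by
          simp [beq_eq_false_iff_ne.mpr hz]
        rw [List.find?_cons, hP]
        have hne : some i ≠ rest.find? (fun j => pvExact lines j == 0) := by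
          intro h
          exact hmem (List.mem_of_find?_eq_some h.symm)
        simp [hle, hne]
    · rw [if_neg (fun h => hle ((pvCap_le_iff lines cap s i hc hsc).mp h)), ih hrest]
      rw [List.find?_cons]
      have hpredi : (decide (pvExact lines i ≤ s) &&
          decide (some i ≠ (i :: rest).find? (fun j => pvExact lines j == 0))) = false := by
        simp [hle]
      rw [hpredi]
      by_cases hz : pvExact lines i = 0
      · have hneg : s < 0 := by omega
        refine pvFind?_congr_mem rest ?_
        intro j _
        have h1 : ¬ pvExact lines j ≤ s := by have := hEnn j; omega
        simp [h1]
      · have hP : (i :: rest).find? (fun j => pvExact lines j == 0) =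
            rest.find? (fun j => pvExact lines j == 0) := by
          simp [beq_eq_false_iff_ne.mpr hz]
        rw [hP]

theorem pvFindIndex_horiz_eq_choose (lines : List (List Char)) (s : Int) :
    pvFindIndex pvHoriz lines s = pvChoose lines s := by
  simp only [pvFindIndex, pvChoose, PySem.List.len_eq]
  have hc : (0 : Int) ≤ (if 0 < s then s else 0) := by split <;> omega
  have hsc : s ≤ (if 0 < s then s else 0) := by split <;> omega
  have hidx : (pvHoriz lines 0).head? =
      (PySem.List.pyRange 0 ((lines.length : Int) - 1) 1).find?
        (fun i => pvExact lines i == 0) := by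
    rw [pvHoriz_eq, List.head?_filter]
    refine pvFind?_congr_mem _ ?_
    intro i _
    have hnn := pvExact_nonneg lines i
    by_cases h : pvExact lines i = 0
    · simp [h]
    · have : ¬ pvExact lines i ≤ 0 := by omega
      simp [h, this]
  by_cases hs : s = 0
  · rw [if_neg (fun h => h hs), hidx, hs,
        pvChooseLoop_zero lines _ (by rw [← hs] at hc ⊢; exact hc)]
  · rw [if_pos hs, pvFindSmudgeIndex_eq_find?, hidx, pvHoriz_eq lines s, pvFind?_filter,
        pvChooseLoop_unseen lines s _ hs hc hsc _ (PySem.List.nodup_pyRange_one _ _)]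

-- ===== VERDICT (by name: the statement is the Claim_ definition above) =====
theorem pvPerGrid (g : List (List Char)) (s : Int) :
    pvFindIndex pvVert g s = pvChoose (pvTranspose g) s := by
  have h : pvFindIndex pvVert g s = pvFindIndex pvHoriz (pvTranspose g) s := rfl
  rw [h, pvFindIndex_horiz_eq_choose]

theorem summarize_score_spec : Claim_equal_summarize_score := by
  intro grids smudges _
  unfold Spec_summarize_score summarize_score summarize_score_alt
  refine PySem.List.foldl_congr_mem grids _ _ _ ?_
  intro acc grid _
  simp only [pvPerGrid, pvFindIndex_horiz_eq_choose]
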